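-- pv_equiv track=rewrite | github.com/ZckFreedom/Mathworks | db_sqence/new_way_PCCR.py | find_conk
-- ===== SOURCE A (Python) =====
-- def find_conk(s_sequence):
-- 	size = len(s_sequence)
-- 	state = s_sequence[:size - 1]
-- 	state += [1 - x for x in state]
-- 	state += s_sequence
-- 	states = []
--
-- 	for i in range(0, 2 * size - 1):
-- 		if state[i: i + size] not in states:
-- 			states.append(state[i: i + size])
--
-- 	states.sort()
-- 	return states[0]
-- ===== SOURCE B (Python) =====
-- def find_conk(s_sequence):
-- 	size = len(s_sequence)
-- 	pre = s_sequence[:size - 1]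
-- 	state = pre + [1 - x for x in pre] + s_sequence
-- 	best = 0
-- 	for i in range(1, 2 * size - 1):
-- 		for j in range(size):
-- 			if state[i + j] != state[best + j]:
-- 				if state[i + j] < state[best + j]:
-- 					best = i
-- 				break
-- 	return state[best:best + size]
-- ===== Notes on version B (the rewrite author's own statement) =====
-- stated objective: faster
-- what changed: B replaces A's collect-all-windows / list-membership dedup / sort / take-head pipeline by an index-based argmin scan: it keeps only the starting index of the best window, compares candidate windows element by element with early exit on the first differing position, and slices once at the end.
import Mathlib
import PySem

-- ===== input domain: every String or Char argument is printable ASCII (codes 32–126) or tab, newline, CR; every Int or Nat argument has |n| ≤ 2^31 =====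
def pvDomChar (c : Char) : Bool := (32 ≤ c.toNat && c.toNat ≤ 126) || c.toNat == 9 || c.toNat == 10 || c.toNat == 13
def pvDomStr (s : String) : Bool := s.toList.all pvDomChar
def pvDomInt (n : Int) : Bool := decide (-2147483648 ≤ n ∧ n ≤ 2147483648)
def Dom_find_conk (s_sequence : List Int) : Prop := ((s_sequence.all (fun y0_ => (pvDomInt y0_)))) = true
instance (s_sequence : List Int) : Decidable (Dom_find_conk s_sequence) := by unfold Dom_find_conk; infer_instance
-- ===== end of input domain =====

-- B replaces A's collect-windows/dedup/sort/take-head pipeline by an index-based argmin scan with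
-- early-exit element-wise window comparison, slicing only once at the end (objective: faster).
-- ===== PORT A =====
def find_conk (s_sequence : List Int) : List Int :=
  let size : Int := (s_sequence.length : Int)
  let state := PySem.List.slice s_sequence none (some (size - 1))
  let state := state ++ state.map (fun x => 1 - x)
  let state := state ++ s_sequence
  let states : List (List Int) :=
    (PySem.List.pyRange 0 (2 * size - 1) 1).foldl
      (fun sts i =>
        if PySem.List.slice state (some i) (some (i + size)) ∈ sts then sts
        else sts ++ [PySem.List.slice state (some i) (some (i + size))]) []
  let sorted := PySem.List.sorted states (fun x => x) false
  PySem.List.pyGetD sorted 0 []   -- states[0]; in range under Pre_ (s_sequence ≠ [])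

-- ===== PORT B =====
-- inner 'for j in range(size): if state[i+j] != state[best+j]: …; break' loop:
-- fuel k counts the remaining js, j is the current offset; result = should best be replaced by i
def winLt (state : List Int) (i b : Int) : Nat → Int → Bool
  | 0, _ => false
  | k + 1, j =>
    let x := PySem.List.pyGetD state (i + j) 0
    let y := PySem.List.pyGetD state (b + j) 0
    if x ≠ y then decide (x < y) else winLt state i b k (j + 1)

def find_conk_alt (s_sequence : List Int) : List Int :=
  let size : Int := (s_sequence.length : Int)
  let pre := PySem.List.slice s_sequence none (some (size - 1))
  let state := pre ++ pre.map (fun x => 1 - x) ++ s_sequence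
  let best : Int :=
    (PySem.List.pyRange 1 (2 * size - 1) 1).foldl
      (fun best i => if winLt state i best size.toNat 0 then i else best) 0
  PySem.List.slice state (some best) (some (best + size))

-- ===== PRECONDITION & SPEC =====
-- Pre_ excludes the empty list, on which A raises IndexError (states is empty, states[0] fails).
def Pre_find_conk (s_sequence : List Int) : Prop := s_sequence ≠ []
instance (s_sequence : List Int) : Decidable (Pre_find_conk s_sequence) := by unfold Pre_find_conk; infer_instance
def pvWitness_find_conk : List Int := [1, 0, 1]

def Spec_find_conk (s_sequence : List Int) (out : List Int) : Prop := out = find_conk_alt s_sequence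
instance (s_sequence : List Int) (out : List Int) : Decidable (Spec_find_conk s_sequence out) := by unfold Spec_find_conk; infer_instance

-- ===== CLAIM (what is proved, stated in full; the proofs are below) =====
def Claim_equal_find_conk : Prop := ∀ (s_sequence : List Int), Dom_find_conk s_sequence → Pre_find_conk s_sequence → Spec_find_conk s_sequence (find_conk s_sequence)

-- ===== LEMMAS AND PROOFS =====

-- winLt compares the j-suffixes (length k) of the two windows lexicographically.
theorem winLt_eq (st : List Int) (k : Nat) (a b j : Int)
    (ha : 0 ≤ a + j) (hb : 0 ≤ b + j) (hj : 0 ≤ j)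
    (hak : (a + j).toNat + k ≤ st.length) (hbk : (b + j).toNat + k ≤ st.length) :
    winLt st a b k j =
      decide ((st.drop (a + j).toNat).take k < (st.drop (b + j).toNat).take k) := by
  induction k generalizing j with
  | zero => simp [winLt]
  | succ k ih =>
    have haL : (a + j).toNat < st.length := by omega
    have hbL : (b + j).toNat < st.length := by omega
    have hx : PySem.List.pyGetD st (a + j) 0 = st[(a + j).toNat] :=
      PySem.List.pyGetD_eq_getElem st 0 ha (by omega)
    have hy : PySem.List.pyGetD st (b + j) 0 = st[(b + j).toNat] :=
      PySem.List.pyGetD_eq_getElem st 0 hb (by omega)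
    rw [List.drop_eq_getElem_cons haL, List.drop_eq_getElem_cons hbL]
    simp only [List.take_succ_cons, winLt, hx, hy]
    by_cases hne : st[(a + j).toNat] ≠ st[(b + j).toNat]
    · simp only [if_pos hne, decide_eq_decide, List.cons_lt_cons_iff]
      constructor
      · exact fun h => Or.inl h
      · rintro (h | ⟨heq, _⟩)
        · exact h
        · exact absurd heq hne
    · simp only [ne_eq, not_not] at hne
      simp only [hne, ne_eq, not_true_eq_false, if_false]
      have h1 : a + (j + 1) = a + j + 1 := by ring
      have h2 : b + (j + 1) = b + j + 1 := by ring
      have := ih (j + 1) (by omega) (by omega) (by omega)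
        (by rw [h1]; omega) (by rw [h2]; omega)
      rw [this, h1, h2]
      have ta : (a + j + 1).toNat = (a + j).toNat + 1 := by omega
      have tb : (b + j + 1).toNat = (b + j).toNat + 1 := by omega
      rw [ta, tb]
      simp only [decide_eq_decide, List.cons_lt_cons_iff]
      simp

-- B's index fold computes (via the window function) the same running minimum as folding over windows.
theorem argmin_fold (st : List Int) (n : Nat) (idxs : List Int) (b0 : Int)
    (hb0 : 0 ≤ b0 ∧ b0.toNat + n ≤ st.length)
    (hidx : ∀ i ∈ idxs, 0 ≤ i ∧ i.toNat + n ≤ st.length) :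
    (st.drop (idxs.foldl (fun b i => if winLt st i b n 0 then i else b) b0).toNat).take n =
      (idxs.map (fun i => (st.drop i.toNat).take n)).foldl
        (fun best w => if w < best then w else best)
        ((st.drop b0.toNat).take n) := by
  induction idxs generalizing b0 with
  | nil => simp
  | cons i t ih =>
    obtain ⟨hi, hin⟩ := hidx i (List.mem_cons_self ..)
    obtain ⟨hb, hbn⟩ := hb0
    have hw : winLt st i b0 n 0 =
        decide ((st.drop i.toNat).take n < (st.drop b0.toNat).take n) := by
      have := winLt_eq st n i b0 0 (by omega) (by omega) le_rfl
        (by simpa using hin) (by simpa using hbn)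
      simpa using this
    simp only [List.foldl_cons, List.map_cons, hw]
    by_cases hlt : (st.drop i.toNat).take n < (st.drop b0.toNat).take n
    · rw [if_pos (by simpa using hlt), if_pos hlt]
      exact ih i ⟨hi, hin⟩ (fun x hx => hidx x (List.mem_cons_of_mem _ hx))
    · rw [if_neg (by simpa using hlt), if_neg hlt]
      exact ih b0 ⟨hb, hbn⟩ (fun x hx => hidx x (List.mem_cons_of_mem _ hx))

-- B's running-minimum fold: its result is the init or a list element, and is ≤ everything seen.
theorem foldl_min_spec (ws : List (List Int)) (b : List Int) :
    (ws.foldl (fun best w => if w < best then w else best) b = b ∨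
       ws.foldl (fun best w => if w < best then w else best) b ∈ ws) ∧
    ws.foldl (fun best w => if w < best then w else best) b ≤ b ∧
    ∀ y ∈ ws, ws.foldl (fun best w => if w < best then w else best) b ≤ y := by
  induction ws generalizing b with
  | nil => simp
  | cons w t ih =>
    simp only [List.foldl_cons]
    by_cases h : w < b
    · simp only [if_pos h]
      obtain ⟨m1, m2, m3⟩ := ih w
      refine ⟨?_, le_trans m2 (le_of_lt h), ?_⟩
      · rcases m1 with h' | h' <;> simp [h', List.mem_cons]
      · intro y hy; rcases List.mem_cons.mp hy with rfl | hy
        · exact m2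
        · exact m3 y hy
    · simp only [if_neg h]
      obtain ⟨m1, m2, m3⟩ := ih b
      refine ⟨?_, m2, ?_⟩
      · rcases m1 with h' | h' <;> simp [h', List.mem_cons]
      · intro y hy; rcases List.mem_cons.mp hy with rfl | hy
        · exact le_trans m2 (not_lt.mp h)
        · exact m3 y hy

-- A's dedup fold keeps exactly the elements of acc and of the traversed list.
theorem dedup_mem (ws : List (List Int)) (acc : List (List Int)) (x : List Int) :
    (x ∈ ws.foldl (fun sts w => if w ∈ sts then sts else sts ++ [w]) acc) ↔
      x ∈ acc ∨ x ∈ ws := by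
  induction ws generalizing acc with
  | nil => simp
  | cons w t ih =>
    simp only [List.foldl_cons]
    by_cases h : w ∈ acc
    · rw [if_pos h, ih]
      constructor
      · rintro (ha | ht)
        · exact Or.inl ha
        · exact Or.inr (List.mem_cons_of_mem _ ht)
      · rintro (ha | hwt)
        · exact Or.inl ha
        · rcases List.mem_cons.mp hwt with rfl | ht
          · exact Or.inl h
          · exact Or.inr ht
    · rw [if_neg h, ih]
      constructor
      · rintro (ha | ht)
        · rcases List.mem_append.mp ha with ha | hx
          · exact Or.inl ha
          · exact Or.inr (List.mem_cons.mpr (Or.inl (List.mem_singleton.mp hx)))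
        · exact Or.inr (List.mem_cons_of_mem _ ht)
      · rintro (ha | hwt)
        · exact Or.inl (List.mem_append.mpr (Or.inl ha))
        · rcases List.mem_cons.mp hwt with rfl | ht
          · exact Or.inl (List.mem_append.mpr (Or.inr (List.mem_singleton.mpr rfl)))
          · exact Or.inr ht

-- ===== VERDICT (by name: the statement is the Claim_ definition above) =====
theorem find_conk_spec : Claim_equal_find_conk := by
  intro s _ hpre
  unfold Spec_find_conk find_conk find_conk_alt
  simp only []
  set size : Int := (s.length : Int) with hsize
  have hlen : 1 ≤ size := by
    have : s.length ≠ 0 := fun h => hpre (List.eq_nil_of_length_eq_zero h)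
    omega
  set pre := PySem.List.slice s none (some (size - 1)) with hpre'
  have hprelen : pre.length = s.length - 1 := by
    rw [hpre', PySem.List.slice_to s (by omega)]
    simp; omega
  set st := (pre ++ pre.map (fun x => 1 - x)) ++ s with hst
  have hstlen : st.length = 3 * s.length - 2 := by
    rw [hst]; simp [hprelen]; omega
  set f : Int → List Int := fun i => PySem.List.slice st (some i) (some (i + size)) with hf
  set n : Int := 2 * size - 1 with hn
  -- window slices as drop/take
  have hslice : ∀ i : Int, 0 ≤ i → f i = (st.drop i.toNat).take size.toNat := by
    intro i hi
    show PySem.List.slice st (some i) (some (i + size)) = _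
    rw [PySem.List.slice_toNat st hi (by omega)]
    congr 1
    omega
  -- A's fold as a fold over the mapped window lists
  have hA : (PySem.List.pyRange 0 n 1).foldl
      (fun sts i => if PySem.List.slice st (some i) (some (i + size)) ∈ sts then sts
        else sts ++ [PySem.List.slice st (some i) (some (i + size))]) ([] : List (List Int)) =
      ((PySem.List.pyRange 0 n 1).map f).foldl
        (fun sts w => if w ∈ sts then sts else sts ++ [w]) [] := by
    rw [List.foldl_map]
  rw [hA]
  set ws : List (List Int) := (PySem.List.pyRange 0 n 1).map f with hws
  set states := ws.foldl (fun sts w => if w ∈ sts then sts else sts ++ [w]) ([] : List (List Int)) with hstates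
  have hmem : ∀ x, x ∈ states ↔ x ∈ ws := by
    intro x; rw [hstates, dedup_mem]; simp
  have hpos : (0 : Int) < n := by omega
  have hsplit : PySem.List.pyRange 0 n 1 = 0 :: PySem.List.pyRange 1 n 1 := by
    have := PySem.List.pyRange_one_cons (a := 0) (b := n) hpos
    simpa using this
  have hws_cons : ws = f 0 :: (PySem.List.pyRange 1 n 1).map f := by
    rw [hws, hsplit, List.map_cons]
  -- the sorted list is nonempty
  have hf0 : f 0 ∈ ws := by rw [hws_cons]; exact List.mem_cons_self ..
  have hne : states ≠ [] := by
    intro h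
    have := (hmem (f 0)).mpr hf0
    rw [h] at this; exact List.not_mem_nil this
  have hinst : (fun (a b : List Int) => a.decidableLT b) = (LinearOrder.toDecidableLT : DecidableLT (List Int)) := by
    funext a b; exact Subsingleton.elim _ _
  obtain ⟨m, t, hs⟩ : ∃ m t, @PySem.List.sorted (List Int) (List Int) List.instLT LinearOrder.toDecidableLT states (fun x => x) false = m :: t := by
    cases h : @PySem.List.sorted (List Int) (List Int) List.instLT LinearOrder.toDecidableLT states (fun x => x) false with
    | nil => exact absurd ((@PySem.List.sorted_eq_nil_iff (List Int) (List Int) List.instLT LinearOrder.toDecidableLT states _ false).mp h) hne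
    | cons m t => exact ⟨m, t, rfl⟩
  rw [show (fun (a b : List Int) => a.decidableLT b) = (LinearOrder.toDecidableLT : DecidableLT (List Int)) from hinst, hs]
  have hmmem : m ∈ ws := by
    refine (hmem m).mp ?_
    have : m ∈ @PySem.List.sorted (List Int) (List Int) List.instLT LinearOrder.toDecidableLT states (fun x => x) false := by
      rw [hs]; exact List.mem_cons_self ..
    exact (@PySem.List.mem_sorted (List Int) (List Int) List.instLT LinearOrder.toDecidableLT states _ false m).mp this
  have hmmin : ∀ y ∈ ws, m ≤ y := by
    intro y hy
    exact PySem.List.key_head_sorted_le states (fun x => x) hs y ((hmem y).mpr hy)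
  -- B's result: the argmin index fold, pushed through the window function f
  have hidx : ∀ i ∈ PySem.List.pyRange 1 n 1, 0 ≤ i ∧ i.toNat + size.toNat ≤ st.length := by
    intro i hi
    have := (PySem.List.mem_pyRange_one (a := 1) (b := n) (x := i)).mp hi
    constructor
    · omega
    · rw [hstlen]; omega
  have hB := argmin_fold st size.toNat (PySem.List.pyRange 1 n 1) 0
    ⟨le_rfl, by rw [hstlen]; simp; omega⟩ hidx
  set bf := (PySem.List.pyRange 1 n 1).foldl
      (fun b i => if winLt st i b size.toNat 0 then i else b) 0 with hbf
  have hbf_nonneg : 0 ≤ bf := by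
    rw [hbf]; clear hB
    have : ∀ (l : List Int) (b : Int), (∀ i ∈ l, 0 ≤ i) → 0 ≤ b →
        0 ≤ l.foldl (fun b i => if winLt st i b size.toNat 0 then i else b) b := by
      intro l
      induction l with
      | nil => intro b _ hb; simpa using hb
      | cons x xs ih =>
        intro b hl hb
        simp only [List.foldl_cons]
        by_cases h : winLt st x b size.toNat 0 = true
        · rw [if_pos h]; exact ih _ (fun i hi => hl i (List.mem_cons_of_mem _ hi)) (hl x (List.mem_cons_self ..))
        · rw [if_neg h]; exact ih _ (fun i hi => hl i (List.mem_cons_of_mem _ hi)) hb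
    exact this _ 0 (fun i hi => (hidx i hi).1) le_rfl
  -- B's return value is (drop bf).take size, which hB equates with the running minimum
  have hBval : PySem.List.slice st (some bf) (some (bf + size)) =
      ((PySem.List.pyRange 1 n 1).map (fun i => (st.drop i.toNat).take size.toNat)).foldl
        (fun best w => if w < best then w else best) ((st.drop (0:Int).toNat).take size.toNat) := by
    exact (hslice bf hbf_nonneg).trans hB
  have hmapeq : (PySem.List.pyRange 1 n 1).map (fun i => (st.drop i.toNat).take size.toNat) =
      (PySem.List.pyRange 1 n 1).map f := by
    apply List.map_congr_left
    intro i hi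
    exact (hslice i (by have := (PySem.List.mem_pyRange_one (a := 1) (b := n) (x := i)).mp hi; omega)).symm
  have hf0eq : (st.drop (0:Int).toNat).take size.toNat = f 0 := by
    rw [hslice 0 le_rfl]
  rw [hBval, hmapeq, hf0eq]
  -- both are the minimum of ws
  obtain ⟨r1, r2, r3⟩ := foldl_min_spec ((PySem.List.pyRange 1 n 1).map f) (f 0)
  set r := ((PySem.List.pyRange 1 n 1).map f).foldl (fun best w => if w < best then w else best) (f 0) with hr
  have hrmem : r ∈ ws := by
    rw [hws_cons]
    rcases r1 with h' | h'
    · exact h' ▸ List.mem_cons_self ..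
    · exact List.mem_cons_of_mem _ h'
  have hrmin : ∀ y ∈ ws, r ≤ y := by
    intro y hy
    rcases List.mem_cons.mp (hws_cons ▸ hy) with rfl | hy'
    · exact r2
    · exact r3 y hy'
  have : m = r := le_antisymm (hmmin r hrmem) (hrmin m hmmem)
  simp [PySem.List.pyGetD_zero_cons, this]
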